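-- pv_equiv track=rewrite | github.com/decent-tools-for-thought/ols-cli | src/ols_cli/openapi.py | cli_flag_for_name
-- ===== SOURCE A (Python) =====
-- def cli_flag_for_name(name: str) -> str:
--     out: list[str] = []
--     for ch in name:
--         if ch.isalnum():
--             out.append(ch.lower())
--         else:
--             out.append("-")
--     flag = "".join(out)
--     while "--" in flag:
--         flag = flag.replace("--", "-")
--     return flag.strip("-") or "arg"
-- ===== SOURCE B (Python) =====
-- def cli_flag_for_name(name: str) -> str:
--     # Single pass: collect lowercased alnum runs as tokens, join with '-'.
--     tokens: list[str] = []
--     cur: list[str] = []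
--     for ch in name:
--         if ch.isalnum():
--             cur.append(ch.lower())
--         else:
--             if cur:
--                 tokens.append("".join(cur))
--                 cur = []
--     if cur:
--         tokens.append("".join(cur))
--     return "-".join(tokens) or "arg"
-- ===== Notes on version B (the rewrite author's own statement) =====
-- stated objective: simpler
-- what changed: Replaced A's per-char mapping followed by a replace-until-fixpoint loop that collapses doubled dashes and a final dash strip with a single left-to-right pass that accumulates lowercased alphanumeric runs as tokens and joins them with single dashes.
import Mathlib
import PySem

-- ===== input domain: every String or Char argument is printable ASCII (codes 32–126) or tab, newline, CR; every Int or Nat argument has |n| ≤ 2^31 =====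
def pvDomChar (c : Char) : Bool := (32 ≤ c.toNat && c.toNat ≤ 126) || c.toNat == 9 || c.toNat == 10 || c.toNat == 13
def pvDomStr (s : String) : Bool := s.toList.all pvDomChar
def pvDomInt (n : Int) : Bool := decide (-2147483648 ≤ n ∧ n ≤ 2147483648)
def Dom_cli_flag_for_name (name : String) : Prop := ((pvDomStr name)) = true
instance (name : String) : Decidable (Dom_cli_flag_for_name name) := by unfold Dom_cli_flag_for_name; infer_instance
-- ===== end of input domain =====

-- B replaces A's replace-until-fixpoint dash collapsing and strip with a single pass that
-- collects lowercased alphanumeric runs and joins them with single dashes (objective: simpler).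

-- ===== PORT A =====
-- A's `while "--" in flag: flag = flag.replace("--", "-")` loop; the fuel bound length+1 is
-- enough because each replace strictly shortens the string while "--" occurs (proved below).
def pvAwhile : Nat → List Char → List Char
| 0, flag => flag
| fuel+1, flag =>
  if PySem.Chars.isIn ['-','-'] flag then
    pvAwhile fuel (PySem.Chars.replace flag ['-','-'] ['-'])
  else flag

def cli_flag_for_name (name : String) : String :=
  let out : List (List Char) := name.toList.foldl
    (fun acc ch => acc ++ [if PySem.Chars.isalnum ch then PySem.Chars.lower [ch] else ['-']]) []
  let flag : List Char := PySem.Chars.join [] out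
  let flag2 : List Char := pvAwhile (flag.length + 1) flag
  let flag3 : List Char := PySem.Chars.stripChars flag2 ['-']
  if flag3.isEmpty then "arg" else String.ofList flag3

-- ===== PORT B =====
-- one step of B's loop: grow the current buffer on an alnum char, else flush it (if non-empty)
def pvBStep (st : List (List Char) × List Char) (ch : Char) : List (List Char) × List Char :=
  if PySem.Chars.isalnum ch then (st.1, st.2 ++ [PySem.Chars.lowerChar ch])
  else if st.2.isEmpty then st else (st.1 ++ [st.2], [])

def cli_flag_for_name_alt (name : String) : String :=
  let st := name.toList.foldl pvBStep ([], [])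
  let toks := if st.2.isEmpty then st.1 else st.1 ++ [st.2]
  let r : List Char := PySem.Chars.join ['-'] toks
  if r.isEmpty then "arg" else String.ofList r

-- ===== PRECONDITION & SPEC =====
def Spec_cli_flag_for_name (name : String) (out : String) : Prop := out = cli_flag_for_name_alt name
instance (name : String) (out : String) : Decidable (Spec_cli_flag_for_name name out) := by unfold Spec_cli_flag_for_name; infer_instance

-- ===== CLAIM (what is proved, stated in full; the proofs are below) =====
def Claim_equal_cli_flag_for_name : Prop := ∀ (name : String), Dom_cli_flag_for_name name → Spec_cli_flag_for_name name (cli_flag_for_name name)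

-- ===== LEMMAS AND PROOFS =====

def pvP1 : List Char → List Char
| [] => []
| [c] => [c]
| c1 :: c2 :: t => if c1 = '-' ∧ c2 = '-' then '-' :: pvP1 t else c1 :: pvP1 (c2 :: t)

theorem go_eq : ∀ (fuel : Nat) (l acc : List Char), l.length ≤ fuel →
    PySem.Chars.replace.go ['-','-'] ['-'] fuel l acc = acc.reverse ++ pvP1 l := by
  intro fuel
  induction fuel with
  | zero =>
    intro l acc h
    match l with
    | [] => simp [PySem.Chars.replace.go, pvP1]
  | succ n ih =>
    intro l acc h
    match l with
    | [] => simp [PySem.Chars.replace.go, pvP1]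
    | [c] =>
      rw [PySem.Chars.replace.go]
      have hp : List.isPrefixOf ['-','-'] [c] = false := by simp [List.isPrefixOf]
      simp only [hp, if_neg Bool.false_ne_true, ih [] (c :: acc) (by simp)]
      simp [pvP1]
    | c1 :: c2 :: t =>
      rw [PySem.Chars.replace.go]
      simp only [List.length_cons, Nat.add_le_add_iff_right] at h
      by_cases hp : c1 = '-' ∧ c2 = '-'
      · have hpre : List.isPrefixOf ['-','-'] (c1 :: c2 :: t) = true := by
          simp [List.isPrefixOf, hp.1, hp.2]
        simp only [hpre, if_pos]
        have hdrop : List.drop (['-','-'] : List Char).length (c1::c2::t) = t := by simp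
        rw [hdrop, ih t (['-'].reverse ++ acc) (by omega)]
        simp [pvP1, hp]
      · have hpre : List.isPrefixOf ['-','-'] (c1 :: c2 :: t) = false := by
          simp only [List.isPrefixOf]
          simp only [Bool.and_eq_false_iff, beq_eq_false_iff_ne, ne_eq]
          by_cases h1 : c1 = '-'
          · right; left; intro h2; exact hp ⟨h1, h2.symm⟩
          · left; intro h2; exact h1 h2.symm
        simp only [hpre, if_neg Bool.false_ne_true]
        rw [ih (c2 :: t) (c1 :: acc) (by simp; omega)]
        simp [pvP1, hp]

def pvNoDD : List Char → Bool
| [] => true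
| [_] => true
| c1 :: c2 :: t => !(c1 = '-' && c2 = '-') && pvNoDD (c2 :: t)

theorem find_go_eq : ∀ (l : List Char) (k : Nat),
    (PySem.Chars.find.go ['-','-'] l k = -1) ↔ pvNoDD l = true := by
  intro l
  induction l with
  | nil => intro k; simp [PySem.Chars.find.go, pvNoDD]
  | cons c t ih =>
    intro k
    rw [PySem.Chars.find.go]
    match t with
    | [] =>
      have hp : List.isPrefixOf ['-','-'] [c] = false := by simp [List.isPrefixOf]
      simp [hp, PySem.Chars.find.go, pvNoDD]
    | c2 :: r =>
      by_cases hp : c = '-' ∧ c2 = '-'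
      · have hpre : List.isPrefixOf ['-','-'] (c :: c2 :: r) = true := by
          simp [List.isPrefixOf, hp.1, hp.2]
        simp [hpre, pvNoDD, hp.1, hp.2]
      · have hpre : List.isPrefixOf ['-','-'] (c :: c2 :: r) = false := by
          simp only [List.isPrefixOf]
          simp only [Bool.and_eq_false_iff, beq_eq_false_iff_ne, ne_eq]
          by_cases h1 : c = '-'
          · right; left; intro h2; exact hp ⟨h1, h2.symm⟩
          · left; intro h2; exact h1 h2.symm
        simp only [hpre, if_neg Bool.false_ne_true, ih (k+1)]
        have : (decide (c = '-') && decide (c2 = '-')) = false := by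
          simp; intro h1 h2; exact hp ⟨h1, h2⟩
        simp [pvNoDD, this]

theorem isIn_eq (s : List Char) : PySem.Chars.isIn ['-','-'] s = !pvNoDD s := by
  simp only [PySem.Chars.isIn, PySem.Chars.find]
  by_cases h : pvNoDD s = true
  · simp [h, (find_go_eq s 0).mpr h]
  · have h2 : PySem.Chars.find.go ['-','-'] s 0 ≠ -1 := fun hc => h ((find_go_eq s 0).mp hc)
    simp only [Bool.not_eq_true] at h
    simp [h, bne_iff_ne, h2]

def pvC : List Char → List Char
| [] => []
| [c] => [c]
| c1 :: c2 :: t => if c1 = '-' ∧ c2 = '-' then pvC (c2 :: t) else c1 :: pvC (c2 :: t)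

theorem pvC_cons_ne (c : Char) (l : List Char) (h : c ≠ '-') : pvC (c :: l) = c :: pvC l := by
  match l with
  | [] => simp [pvC]
  | c2 :: t =>
    have : ¬(c = '-' ∧ c2 = '-') := fun hc => h hc.1
    simp [pvC, this]

theorem pvC_dash_cons (l : List Char) :
    pvC ('-' :: l) = if l.head? = some '-' then pvC l else '-' :: pvC l := by
  match l with
  | [] => simp [pvC]
  | c2 :: t =>
    by_cases h : c2 = '-'
    · simp [pvC, h]
    · have h2 : ¬('-' = '-' ∧ c2 = '-') := fun hc => h hc.2
      simp [pvC, h, h2]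

theorem head?_pvP1 (l : List Char) : (pvP1 l).head? = l.head? := by
  match l with
  | [] => simp [pvP1]
  | [c] => simp [pvP1]
  | c1 :: c2 :: t => by_cases h : c1 = '-' ∧ c2 = '-' <;> simp [pvP1, h] <;> simp [h.1]

theorem pvC_of_noDD (l : List Char) (h : pvNoDD l = true) : pvC l = l := by
  match l with
  | [] => simp [pvC]
  | [c] => simp [pvC]
  | c1 :: c2 :: t =>
    simp only [pvNoDD, Bool.and_eq_true, Bool.not_eq_true'] at h
    have h1 : ¬(c1 = '-' ∧ c2 = '-') := by
      intro hc; simp [hc.1, hc.2] at h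
    simp [pvC, h1, pvC_of_noDD (c2 :: t) h.2]

theorem len_pvP1_le (l : List Char) : (pvP1 l).length ≤ l.length := by
  match l with
  | [] => simp [pvP1]
  | [c] => simp [pvP1]
  | c1 :: c2 :: t =>
    by_cases h : c1 = '-' ∧ c2 = '-' <;> simp [pvP1, h]
    · have := len_pvP1_le t; omega
    · have := len_pvP1_le (c2 :: t); simp at this; omega

theorem len_pvP1_lt (l : List Char) (h : pvNoDD l = false) : (pvP1 l).length < l.length := by
  match l with
  | [] => simp [pvNoDD] at h
  | [c] => simp [pvNoDD] at h
  | c1 :: c2 :: t =>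
    by_cases hp : c1 = '-' ∧ c2 = '-'
    · simp [pvP1, hp]
      have := len_pvP1_le t; omega
    · simp only [pvNoDD, Bool.and_eq_false_iff, Bool.not_eq_false] at h
      rcases h with h | h
      · exfalso; simp at h; exact hp ⟨h.1, h.2⟩
      · simp [pvP1, hp]
        have := len_pvP1_lt (c2 :: t) h; simp at this; omega

theorem pvC_pvP1 (l : List Char) : pvC (pvP1 l) = pvC l := by
  match l with
  | [] => simp [pvP1]
  | [c] => simp [pvP1]
  | c1 :: c2 :: t =>
    by_cases hp : c1 = '-' ∧ c2 = '-'
    · obtain ⟨h1, h2⟩ := hp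
      subst h1; subst h2
      rw [show pvP1 ('-' :: '-' :: t) = '-' :: pvP1 t from by simp [pvP1]]
      rw [pvC_dash_cons (pvP1 t), head?_pvP1]
      rw [show pvC ('-' :: '-' :: t) = pvC ('-' :: t) from by simp [pvC], pvC_dash_cons t]
      by_cases ht : t.head? = some '-' <;> simp [ht, pvC_pvP1 t]
    · simp only [pvP1, if_neg hp]
      have hhead : (pvP1 (c2 :: t)).head? = some c2 := by rw [head?_pvP1]; rfl
      by_cases h1 : c1 = '-'
      · have h2 : c2 ≠ '-' := fun hc => hp ⟨h1, hc⟩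
        rw [h1, pvC_dash_cons (pvP1 (c2 :: t)), if_neg (by simp [hhead, h2])]
        rw [pvC_dash_cons (c2 :: t), if_neg (by simp [h2])]
        rw [pvC_pvP1 (c2 :: t)]
      · rw [pvC_cons_ne c1 _ h1, pvC_cons_ne c1 _ h1, pvC_pvP1 (c2 :: t)]

theorem replace_eq_pvP1 (s : List Char) : PySem.Chars.replace s ['-','-'] ['-'] = pvP1 s := by
  rw [PySem.Chars.replace]
  simp only [List.isEmpty_cons, if_neg Bool.false_ne_true]
  rw [go_eq s.length s [] le_rfl]
  simp

theorem awhile_eq (fuel : Nat) (s : List Char) (h : s.length ≤ fuel) :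
    pvAwhile fuel s = pvC s := by
  induction fuel generalizing s with
  | zero =>
    match s, h with
    | [], _ => simp [pvAwhile, pvC]
  | succ n ih =>
    rw [pvAwhile, isIn_eq, replace_eq_pvP1]
    by_cases hn : pvNoDD s = true
    · simp [hn, pvC_of_noDD s hn]
    · simp only [Bool.not_eq_true] at hn
      have hlt := len_pvP1_lt s hn
      simp only [hn, Bool.not_false, if_true]
      rw [ih (pvP1 s) (by omega), pvC_pvP1]

def pvF (ch : Char) : Char := if PySem.Chars.isalnum ch then PySem.Chars.lowerChar ch else '-'

theorem lowerChar_ne_dash (c : Char) (h : PySem.Chars.isalnum c = true) :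
    PySem.Chars.lowerChar c ≠ '-' := by
  rw [PySem.Chars.lowerChar]
  by_cases hu : PySem.Chars.isupper c = true
  · simp only [PySem.Chars.isupper, Bool.and_eq_true, decide_eq_true_eq] at hu
    have h1 : c.toNat ≤ 90 := hu.2
    simp only [PySem.Chars.isupper, Bool.and_eq_true, decide_eq_true_eq, if_pos hu]
    intro hc
    have h2 : (Char.ofNat (c.toNat + 32)).toNat = '-'.toNat := by rw [hc]
    have h3 : (Char.ofNat (c.toNat + 32)).toNat = c.toNat + 32 := by
      unfold Char.ofNat
      split
      · rfl
      · rename_i hv; exfalso; exact hv (Or.inl (by omega))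
    have h4 : '-'.toNat = 45 := by decide
    have h5 : 65 ≤ c.toNat := hu.1
    omega
  · simp only [Bool.not_eq_true] at hu
    simp only [PySem.Chars.isupper, Bool.and_eq_true, decide_eq_true_eq] at hu ⊢
    rw [if_neg (by simpa [PySem.Chars.isupper] using hu)]
    intro hc
    subst hc
    simp [PySem.Chars.isalnum, PySem.Chars.isalpha, PySem.Chars.isdigit,
      PySem.Chars.isupper, PySem.Chars.islower] at h

def pvTk : List Char → List Char → List (List Char)
| cur, [] => if cur.isEmpty then [] else [cur]
| cur, c :: t =>
  if PySem.Chars.isalnum c then pvTk (cur ++ [PySem.Chars.lowerChar c]) t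
  else if cur.isEmpty then pvTk [] t else cur :: pvTk [] t

def pvMapHead (g : List Char → List Char) : List (List Char) → List (List Char)
| [] => []
| h :: t => g h :: t

theorem pvTk_ne_nil (cs : List Char) (cur : List Char) (h : cur ≠ []) : pvTk cur cs ≠ [] := by
  induction cs generalizing cur with
  | nil => simp [pvTk, h]
  | cons c t ih =>
    rw [pvTk]
    by_cases ha : PySem.Chars.isalnum c = true
    · simp only [ha, if_true]; exact ih _ (by simp)
    · simp [ha, h]

theorem pvTk_acc (cs : List Char) (cur₁ cur₂ : List Char) (h : cur₂ ≠ []) :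
    pvTk (cur₁ ++ cur₂) cs = pvMapHead (cur₁ ++ ·) (pvTk cur₂ cs) := by
  induction cs generalizing cur₂ with
  | nil => simp [pvTk, h, pvMapHead]
  | cons c t ih =>
    rw [pvTk, pvTk]
    by_cases ha : PySem.Chars.isalnum c = true
    · simp only [ha, if_true]
      rw [List.append_assoc]
      exact ih (cur₂ ++ [PySem.Chars.lowerChar c]) (by simp)
    · simp [ha, h, pvMapHead]

theorem pvTk_mem (cs : List Char) (cur : List Char) (hc : '-' ∉ cur) :
    ∀ tok ∈ pvTk cur cs, tok ≠ [] ∧ '-' ∉ tok := by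
  induction cs generalizing cur with
  | nil =>
    rw [pvTk]
    by_cases h : cur.isEmpty
    · simp [h]
    · simp only [h, Bool.false_eq_true, if_false, List.mem_singleton]
      intro tok ht; subst ht
      exact ⟨by simpa using h, hc⟩
  | cons c t ih =>
    rw [pvTk]
    by_cases ha : PySem.Chars.isalnum c = true
    · simp only [ha, if_true]
      refine ih _ ?_
      simp only [List.mem_append, List.mem_singleton]
      rintro (h1 | h1)
      · exact hc h1
      · exact lowerChar_ne_dash c ha h1.symm
    · simp only [ha, Bool.false_eq_true, if_false]
      by_cases h : cur.isEmpty
      · simp only [h, if_true]; exact ih [] (by simp)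
      · simp only [h, Bool.false_eq_true, if_false, List.mem_cons]
        intro tok htok
        rcases htok with h1 | h1
        · subst h1; exact ⟨by simpa using h, hc⟩
        · exact ih [] (by simp) tok h1

theorem inter_singleton (x : List Char) : List.intercalate ['-'] [x] = x := by
  simp [List.intercalate]

theorem inter_cons_cons (x y : List Char) (ts : List (List Char)) :
    List.intercalate ['-'] (x :: y :: ts) = x ++ '-' :: List.intercalate ['-'] (y :: ts) := by
  simp [List.intercalate, List.intersperse]

theorem inter_mapHead_cons (lc : Char) (ts : List (List Char)) (h : ts ≠ []) :
    List.intercalate ['-'] (pvMapHead (fun r => [lc] ++ r) ts) = lc :: List.intercalate ['-'] ts := by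
  match ts with
  | [x] => simp [pvMapHead, inter_singleton]
  | x :: y :: t => rw [pvMapHead, inter_cons_cons, inter_cons_cons]; simp

def pvStartsSep : List Char → Bool
| [] => false
| c :: _ => !PySem.Chars.isalnum c

def pvEndsSep : List Char → Bool
| [] => false
| [c] => !PySem.Chars.isalnum c
| _ :: c2 :: t => pvEndsSep (c2 :: t)

def pvJ (cs : List Char) : List Char := List.intercalate ['-'] (pvTk [] cs)

def pvTr (cs : List Char) : List Char :=
  if (pvTk [] cs).isEmpty || !pvEndsSep cs then [] else ['-']

theorem pvTk_nil_endsSep (cs : List Char) (h : pvTk [] cs = []) (hne : cs ≠ []) :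
    pvEndsSep cs = true := by
  match cs with
  | c :: t =>
    rw [pvTk] at h
    by_cases ha : PySem.Chars.isalnum c = true
    · exfalso; simp only [ha, if_true] at h
      exact pvTk_ne_nil t [PySem.Chars.lowerChar c] (by simp) h
    · simp only [ha, Bool.false_eq_true, if_false, List.isEmpty_nil, if_true] at h
      match t with
      | [] => simp [pvEndsSep, ha]
      | d :: r =>
        rw [show pvEndsSep (c :: d :: r) = pvEndsSep (d :: r) from rfl]
        exact pvTk_nil_endsSep (d :: r) h (by simp)

theorem head_mapF (t : List Char) :
    ((t.map pvF).head? = some '-') ↔ pvStartsSep t = true := by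
  match t with
  | [] => simp [pvStartsSep]
  | d :: r =>
    simp only [List.map_cons, List.head?_cons, Option.some_inj, pvStartsSep, Bool.not_eq_true']
    constructor
    · intro h
      by_cases ha : PySem.Chars.isalnum d = true
      · exact absurd h (by simp [pvF, ha, lowerChar_ne_dash d ha])
      · simpa using ha
    · intro h; simp [pvF, h]

theorem pvEndsSep_cons_cons (c d : Char) (r : List Char) :
    pvEndsSep (c :: d :: r) = pvEndsSep (d :: r) := rfl

theorem mainA (cs : List Char) :
    pvC (cs.map pvF) = (if pvStartsSep cs then ['-'] else []) ++ pvJ cs ++ pvTr cs := by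
  match cs with
  | [] => simp [pvC, pvJ, pvTk, pvTr, pvStartsSep, List.intercalate]
  | c :: t =>
    by_cases ha : PySem.Chars.isalnum c = true
    · -- alnum head
      have hlc := lowerChar_ne_dash c ha
      have hf : pvF c = PySem.Chars.lowerChar c := by simp [pvF, ha]
      rw [List.map_cons, hf, pvC_cons_ne _ _ hlc, mainA t]
      have hss : pvStartsSep (c :: t) = false := by simp [pvStartsSep, ha]
      have htk : pvTk [] (c :: t) = pvTk [PySem.Chars.lowerChar c] t := by
        rw [pvTk]; simp [ha]
      match t with
      | [] =>
        simp [pvStartsSep, pvJ, pvTr, htk, pvTk, inter_singleton, pvEndsSep, ha, hss,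
          List.intercalate]
      | d :: r =>
        by_cases hd : PySem.Chars.isalnum d = true
        · have htk2 : pvTk [PySem.Chars.lowerChar c] (d :: r)
              = pvMapHead (fun x => [PySem.Chars.lowerChar c] ++ x) (pvTk [] (d :: r)) := by
            rw [pvTk, pvTk]
            simp only [hd, if_true, List.nil_append]
            exact pvTk_acc r [PySem.Chars.lowerChar c] [PySem.Chars.lowerChar d] (by simp)
          have hne : pvTk [] (d :: r) ≠ [] := by
            rw [pvTk]; simp only [hd, if_true, List.nil_append]
            exact pvTk_ne_nil r _ (by simp)
          have hJ : pvJ (c :: d :: r) = PySem.Chars.lowerChar c :: pvJ (d :: r) := by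
            rw [pvJ, htk, htk2, inter_mapHead_cons _ _ hne, pvJ]
          have hTkne : pvTk [] (c :: d :: r) ≠ [] := by
            rw [htk, htk2]
            match pvTk [] (d :: r), hne with
            | x :: xs, _ => simp [pvMapHead]
          have hTr : pvTr (c :: d :: r) = pvTr (d :: r) := by
            rw [pvTr, pvTr, pvEndsSep_cons_cons]
            simp [List.isEmpty_iff, hTkne, hne]
          rw [hJ, hTr, hss]
          have hss2 : pvStartsSep (d :: r) = false := by simp [pvStartsSep, hd]
          simp [hss2]
        · -- d non-alnum
          have htk2 : pvTk [PySem.Chars.lowerChar c] (d :: r)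
              = [PySem.Chars.lowerChar c] :: pvTk [] (d :: r) := by
            rw [pvTk]
            simp only [hd, Bool.false_eq_true, if_false, List.isEmpty_cons, if_false]
            rw [show pvTk [] (d :: r) = pvTk [] r from by rw [pvTk]; simp [hd]]
          have hss2 : pvStartsSep (d :: r) = true := by simp [pvStartsSep, hd]
          rw [hss, hss2]
          by_cases hTk : pvTk [] (d :: r) = []
          · have hJ : pvJ (c :: d :: r) = [PySem.Chars.lowerChar c] := by
              rw [pvJ, htk, htk2, hTk, inter_singleton]
            have hES : pvEndsSep (d :: r) = true := pvTk_nil_endsSep (d :: r) hTk (by simp)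
            have hTr1 : pvTr (d :: r) = [] := by simp [pvTr, hTk]
            have hTr2 : pvTr (c :: d :: r) = ['-'] := by
              rw [pvTr, pvEndsSep_cons_cons, hES, htk, htk2, hTk]
              simp
            have hJ2 : pvJ (d :: r) = [] := by rw [pvJ, hTk]; simp [List.intercalate]
            rw [hJ, hJ2, hTr1, hTr2]
            simp
          · obtain ⟨y, ts, hTkeq⟩ := List.exists_cons_of_ne_nil hTk
            have hJ : pvJ (c :: d :: r)
                = PySem.Chars.lowerChar c :: '-' :: List.intercalate ['-'] (y :: ts) := by
              rw [pvJ, htk, htk2, hTkeq, inter_cons_cons]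
              simp
            have hTr : pvTr (c :: d :: r) = pvTr (d :: r) := by
              rw [pvTr, pvTr, pvEndsSep_cons_cons, htk, htk2, hTkeq]
              simp
            rw [hJ, hTr, pvJ, hTkeq]
            simp
    · -- sep head
      have hf : pvF c = '-' := by simp [pvF, ha]
      rw [List.map_cons, hf, pvC_dash_cons, mainA t]
      have hss : pvStartsSep (c :: t) = true := by simp [pvStartsSep, ha]
      have htk : pvTk [] (c :: t) = pvTk [] t := by rw [pvTk]; simp [ha]
      match t with
      | [] =>
        simp [pvStartsSep, pvJ, pvTr, htk, pvTk, pvEndsSep, ha, hss, pvC, List.intercalate]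
      | d :: r =>
        have hTr : pvTr (c :: d :: r) = pvTr (d :: r) := by
          rw [pvTr, pvTr, pvEndsSep_cons_cons, htk]
        have hJ : pvJ (c :: d :: r) = pvJ (d :: r) := by rw [pvJ, htk, pvJ]
        rw [hss, hJ, hTr]
        by_cases hst : pvStartsSep (d :: r) = true
        · rw [if_pos ((head_mapF (d :: r)).mpr hst), if_pos hst]
          simp
        · rw [if_neg (fun hh => hst ((head_mapF (d :: r)).mp hh)),
            if_neg (by simp [hst]), if_pos rfl]
          simp

theorem inter_first (ts : List (List Char)) (h : ∀ tok ∈ ts, tok ≠ [] ∧ '-' ∉ tok) :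
    (List.intercalate ['-'] ts).head? ≠ some '-' := by
  match ts with
  | [] => simp [List.intercalate]
  | [x] =>
    rw [inter_singleton]
    intro hc
    exact (h x (by simp)).2 (List.mem_of_mem_head? hc)
  | x :: y :: t =>
    rw [inter_cons_cons, List.head?_append_of_ne_nil _ (h x (by simp)).1]
    intro hc
    exact (h x (by simp)).2 (List.mem_of_mem_head? hc)

theorem inter_last (ts : List (List Char)) (h : ∀ tok ∈ ts, tok ≠ [] ∧ '-' ∉ tok) :
    (List.intercalate ['-'] ts).getLast? ≠ some '-' := by
  match ts with
  | [] => simp [List.intercalate]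
  | [x] =>
    rw [inter_singleton]
    intro hc
    exact (h x (by simp)).2 (List.mem_of_getLast? hc)
  | x :: y :: t =>
    rw [inter_cons_cons]
    have hne : ('-' :: List.intercalate ['-'] (y :: t)) ≠ [] := by simp
    rw [List.getLast?_append_of_ne_nil _ hne]
    have hne2 : List.intercalate ['-'] (y :: t) ≠ [] := by
      intro hc
      have := inter_first (y :: t) (fun tok htok => h tok (by simp [htok]))
      rw [hc] at this
      have h1 := (h y (by simp)).1
      match t with
      | [] => rw [inter_singleton] at hc; exact h1 hc
      | z :: t' => rw [inter_cons_cons] at hc; simp at hc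
    rw [show ('-' :: List.intercalate ['-'] (y :: t)).getLast?
        = (List.intercalate ['-'] (y :: t)).getLast? from by
      match hl : List.intercalate ['-'] (y :: t), hne2 with
      | w :: ws, _ => simp]
    exact inter_last (y :: t) (fun tok htok => h tok (by simp [htok]))

theorem dropWhile_of_head (l : List Char) (h : l.head? ≠ some '-') :
    List.dropWhile (fun c => (['-'] : List Char).contains c) l = l := by
  match l with
  | [] => simp
  | y :: ys =>
    have : y ≠ '-' := fun hc => h (by simp [hc])
    simp [List.dropWhile_cons, this]

theorem strip_spec (pre tr J : List Char)
    (hpre : pre = [] ∨ pre = ['-']) (htr : tr = [] ∨ tr = ['-'])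
    (hJtr : J = [] → tr = [])
    (hh : J.head? ≠ some '-') (hl : J.getLast? ≠ some '-') :
    PySem.Chars.stripChars (pre ++ J ++ tr) ['-'] = J := by
  rw [PySem.Chars.stripChars]
  have step1 : List.dropWhile (fun c => (['-'] : List Char).contains c) (pre ++ J ++ tr)
      = J ++ tr := by
    rcases hpre with h | h <;> subst h
    · simp only [List.nil_append]
      match J with
      | [] => rw [hJtr rfl]; simp
      | y :: ys => exact dropWhile_of_head _ (by simpa using hh)
    · rw [List.append_assoc,
        show (['-'] ++ (J ++ tr) : List Char) = '-' :: (J ++ tr) from rfl]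
      rw [show List.dropWhile (fun c => (['-'] : List Char).contains c) ('-' :: (J ++ tr))
          = List.dropWhile (fun c => (['-'] : List Char).contains c) (J ++ tr) from by
        simp [List.dropWhile_cons]]
      match J with
      | [] => rw [hJtr rfl]; simp
      | y :: ys => exact dropWhile_of_head _ (by simpa using hh)
  rw [step1, List.reverse_append]
  rcases htr with h | h <;> subst h
  · simp only [List.reverse_nil, List.nil_append]
    rw [dropWhile_of_head _ (by rwa [List.head?_reverse]), List.reverse_reverse]
  · rw [show (['-'] : List Char).reverse ++ J.reverse = '-' :: J.reverse from by simp]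
    rw [show ('-' :: J.reverse).dropWhile (fun c => (['-'] : List Char).contains c)
        = J.reverse.dropWhile (fun c => (['-'] : List Char).contains c) from by
      simp [List.dropWhile_cons]]
    rw [dropWhile_of_head _ (by rwa [List.head?_reverse]), List.reverse_reverse]
theorem foldB (cs : List Char) (ts : List (List Char)) (cur : List Char) :
    (let st := List.foldl pvBStep (ts, cur) cs
     if st.2.isEmpty then st.1 else st.1 ++ [st.2]) = ts ++ pvTk cur cs := by
  induction cs generalizing ts cur with
  | nil =>
    rw [pvTk]
    by_cases h : cur.isEmpty <;> simp [List.foldl, h]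
  | cons c t ih =>
    simp only [List.foldl_cons]
    rw [pvTk]
    by_cases ha : PySem.Chars.isalnum c = true
    · rw [show pvBStep (ts, cur) c = (ts, cur ++ [PySem.Chars.lowerChar c]) from by
        simp [pvBStep, ha]]
      simp only [ha, if_true]
      exact ih ts _
    · by_cases h : cur.isEmpty
      · rw [show pvBStep (ts, cur) c = (ts, cur) from by simp [pvBStep, ha, h]]
        simp only [ha, Bool.false_eq_true, if_false, h, if_true]
        rw [ih ts cur, show cur = [] from by simpa using h]
      · rw [show pvBStep (ts, cur) c = (ts ++ [cur], []) from by simp [pvBStep, ha, h]]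
        simp only [ha, Bool.false_eq_true, if_false, h, if_false]
        rw [ih (ts ++ [cur]) []]
        simp

theorem mainAB (cs : List Char) :
    PySem.Chars.stripChars
      (pvAwhile ((PySem.Chars.join [] (cs.map (fun ch =>
          if PySem.Chars.isalnum ch then PySem.Chars.lower [ch] else ['-']))).length + 1)
        (PySem.Chars.join [] (cs.map (fun ch =>
          if PySem.Chars.isalnum ch then PySem.Chars.lower [ch] else ['-']))))
      ['-'] = pvJ cs := by
  have hmap : cs.map (fun ch => if PySem.Chars.isalnum ch then PySem.Chars.lower [ch] else ['-'])
      = (cs.map pvF).map (fun c => [c]) := by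
    rw [List.map_map]
    apply List.map_congr_left
    intro ch _
    by_cases ha : PySem.Chars.isalnum ch = true <;>
      simp [PySem.Chars.lower, pvF, ha, Function.comp]
  rw [hmap, PySem.Chars.join_nil_singletons]
  rw [awhile_eq _ _ (by omega), mainA cs]
  have htok := pvTk_mem cs [] (by simp)
  exact strip_spec _ _ _
    (by by_cases h : pvStartsSep cs = true <;> simp [h])
    (by rw [pvTr]; by_cases h : ((pvTk [] cs).isEmpty || !pvEndsSep cs) = true <;> simp [h])
    (by intro hJ
        rw [pvTr]
        by_cases hTk : pvTk [] cs = []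
        · simp [hTk]
        · exfalso
          obtain ⟨y, ys, hy⟩ := List.exists_cons_of_ne_nil hTk
          rw [pvJ, hy] at hJ
          match ys with
          | [] => rw [inter_singleton] at hJ; exact (htok y (by simp [hy])).1 hJ
          | z :: t' => rw [inter_cons_cons] at hJ; simp at hJ)
    (inter_first _ htok) (inter_last _ htok)


theorem final_eq (name : String) : cli_flag_for_name name = cli_flag_for_name_alt name := by
  rw [cli_flag_for_name, cli_flag_for_name_alt]
  simp only [PySem.List.foldl_append_singleton_eq_map, List.nil_append]
  have hB := foldB name.toList [] []
  simp only [List.nil_append] at hB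
  rw [hB, mainAB name.toList]
  rfl

-- ===== VERDICT (by name: the statement is the Claim_ definition above) =====
theorem cli_flag_for_name_spec : Claim_equal_cli_flag_for_name := by
  intro name _
  unfold Spec_cli_flag_for_name
  exact final_eq name
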